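-- pv_equiv track=rewrite | github.com/fryzjergda/DesiRNA | utils/sequence_utils.py | expand_cases
-- ===== SOURCE A (Python) =====
-- def expand_cases(cases, max_value, range_expansion=3):
--     """
--     Expands a set of cases within a specified range without exceeding the maximum value.
--
--     Parameters:
--     cases (set): A set of initial cases.
--     max_value (int): The maximum allowable value in the range.
--     range_expansion (int): The range expansion value around each case.
--
--     Returns:
--     list: A sorted list of expanded cases.
--     """
--
--     expanded_cases = set()  # Using a set to avoid duplicates
--
--     for case in cases:
--         # Adding the cases in the range, taking care not to exceed the maximum value
--         for i in range(-range_expansion, range_expansion + 1):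
--             expanded_value = case + i
--             if 0 < expanded_value <= max_value:  # Checking the boundaries
--                 expanded_cases.add(expanded_value)
--
--     return sorted(list(expanded_cases))
-- ===== SOURCE B (Python) =====
-- def expand_cases(cases, max_value, range_expansion=3):
--     """Interval-merge re-implementation: sort the cases, turn each into a
--     clamped window [max(c-r,1), min(c+r,max_value)], sweep once merging
--     overlapping/adjacent windows, then flatten the disjoint ranges (already
--     sorted, no set and no final sort)."""
--     intervals = []
--     for case in sorted(cases):
--         lo = max(case - range_expansion, 1)
--         hi = min(case + range_expansion, max_value)
--         if lo > hi:
--             continue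
--         if intervals and lo <= intervals[-1][1] + 1:
--             if hi > intervals[-1][1]:
--                 intervals[-1] = (intervals[-1][0], hi)
--         else:
--             intervals.append((lo, hi))
--     result = []
--     for lo, hi in intervals:
--         result.extend(range(lo, hi + 1))
--     return result
-- ===== Notes on version B (the rewrite author's own statement) =====
-- stated objective: faster
-- what changed: Replaces A's per-case enumeration of every window value into a set followed by a final sort with a sort of the cases, a single left-to-right sweep merging the clamped windows [max(c-r,1), min(c+r,max_value)] into disjoint intervals, and a flatten of those intervals that emits the result already sorted and duplicate-free.
import Mathlib
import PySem

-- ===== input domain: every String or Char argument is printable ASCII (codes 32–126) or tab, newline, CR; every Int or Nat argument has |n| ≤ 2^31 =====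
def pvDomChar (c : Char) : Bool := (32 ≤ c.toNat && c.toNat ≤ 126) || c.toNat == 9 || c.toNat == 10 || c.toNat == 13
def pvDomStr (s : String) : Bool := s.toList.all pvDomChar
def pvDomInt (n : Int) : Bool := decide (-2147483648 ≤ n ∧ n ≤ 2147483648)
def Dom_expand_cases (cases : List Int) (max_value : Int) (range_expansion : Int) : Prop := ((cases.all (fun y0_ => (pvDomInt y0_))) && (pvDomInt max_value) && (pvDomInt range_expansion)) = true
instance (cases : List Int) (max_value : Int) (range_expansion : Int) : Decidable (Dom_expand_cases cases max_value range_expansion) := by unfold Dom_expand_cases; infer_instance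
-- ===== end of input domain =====

-- B replaces A's per-case window enumeration into a set plus a final sort by a
-- sort of the cases, one interval-merging sweep over the clamped windows, and a
-- flatten of the resulting disjoint ranges (objective: faster; measured).

-- ===== PORT A =====
def expand_cases (cases : List Int) (max_value : Int) (range_expansion : Int) : List Int :=
  let expanded_cases : PySem.Set Int :=
    cases.foldl (fun s case =>
      (PySem.List.pyRange (-range_expansion) (range_expansion + 1)).foldl (fun s i =>
        let expanded_value := case + i
        if 0 < expanded_value ∧ expanded_value ≤ max_value then s.add expanded_value else s) s)
      PySem.Set.empty
  PySem.List.sorted expanded_cases (fun x => x)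

-- ===== PORT B =====
def expand_cases_alt (cases : List Int) (max_value : Int) (range_expansion : Int) : List Int :=
  let intervals : List (Int × Int) :=
    (PySem.List.sorted cases (fun x => x)).foldl (fun intervals case =>
      let lo := max (case - range_expansion) 1
      let hi := min (case + range_expansion) max_value
      if lo > hi then intervals
      else
        match intervals.getLast? with
        | some last =>
          if lo ≤ last.2 + 1 then
            if hi > last.2 then intervals.dropLast ++ [(last.1, hi)] else intervals
          else intervals ++ [(lo, hi)]
        | none => intervals ++ [(lo, hi)]) []
  intervals.foldl (fun result p => result ++ PySem.List.pyRange p.1 (p.2 + 1)) []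

-- ===== PRECONDITION & SPEC =====
def Spec_expand_cases (cases : List Int) (max_value : Int) (range_expansion : Int) (out : List Int) : Prop := out = expand_cases_alt cases max_value range_expansion
instance (cases : List Int) (max_value : Int) (range_expansion : Int) (out : List Int) : Decidable (Spec_expand_cases cases max_value range_expansion out) := by unfold Spec_expand_cases; infer_instance

-- ===== CLAIM (what is proved, stated in full; the proofs are below) =====
def Claim_equal_expand_cases : Prop := ∀ (cases : List Int) (max_value : Int) (range_expansion : Int), Dom_expand_cases cases max_value range_expansion → Spec_expand_cases cases max_value range_expansion (expand_cases cases max_value range_expansion)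

-- ===== LEMMAS AND PROOFS =====

-- the clamped window of a case, and the interval invariants of B's sweep
def pvLo (r c : Int) : Int := max (c - r) 1
def pvHi (m r c : Int) : Int := min (c + r) m

def pvStepB (m r : Int) (acc : List (Int × Int)) (c : Int) : List (Int × Int) :=
  let lo := max (c - r) 1
  let hi := min (c + r) m
  if lo > hi then acc
  else
    match acc.getLast? with
    | some last =>
      if lo ≤ last.2 + 1 then
        if hi > last.2 then acc.dropLast ++ [(last.1, hi)] else acc
      else acc ++ [(lo, hi)]
    | none => acc ++ [(lo, hi)]

def pvInv (m : Int) (acc : List (Int × Int)) : Prop :=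
  acc.Pairwise (fun p q => p.2 + 1 < q.1) ∧ ∀ p ∈ acc, p.1 ≤ p.2 ∧ 1 ≤ p.1 ∧ p.2 ≤ m

def pvMemI (acc : List (Int × Int)) (v : Int) : Prop := ∃ p ∈ acc, p.1 ≤ v ∧ v ≤ p.2

lemma pvLo_mono (r c x : Int) (h : c ≤ x) : pvLo r c ≤ pvLo r x := by unfold pvLo; omega

lemma pvHi_mono (m r c x : Int) (h : c ≤ x) : pvHi m r c ≤ pvHi m r x := by unfold pvHi; omega

lemma pvStepB_spec (m r c : Int) (acc : List (Int × Int))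
    (hinv : pvInv m acc)
    (hc : ∀ p ∈ acc, p.1 ≤ pvLo r c ∧ p.2 ≤ pvHi m r c) :
    pvInv m (pvStepB m r acc c)
    ∧ (∀ p ∈ pvStepB m r acc c, p.1 ≤ pvLo r c ∧ p.2 ≤ pvHi m r c)
    ∧ (∀ v, pvMemI (pvStepB m r acc c) v ↔ pvMemI acc v ∨ (pvLo r c ≤ v ∧ v ≤ pvHi m r c)) := by
  obtain ⟨hpw, hbnd⟩ := hinv
  simp only [pvLo, pvHi] at hc ⊢
  simp only [pvStepB]
  by_cases hgt : max (c - r) 1 > min (c + r) m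
  · simp only [if_pos hgt]
    refine ⟨⟨hpw, hbnd⟩, hc, fun v => ?_⟩
    constructor
    · exact Or.inl
    · rintro (h | ⟨h1, h2⟩)
      · exact h
      · omega
  · simp only [if_neg hgt]
    rcases List.eq_nil_or_concat acc with rfl | ⟨front, last, rfl⟩
    · simp only [List.getLast?_nil, List.nil_append]
      refine ⟨⟨by simp, ?_⟩, ?_, fun v => ?_⟩
      · intro p hp
        simp only [List.mem_singleton] at hp
        subst hp
        exact ⟨by omega, by omega, by omega⟩
      · intro p hp
        simp only [List.mem_singleton] at hp
        subst hp
        exact ⟨le_refl _, le_refl _⟩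
      · simp [pvMemI]
    · simp only [List.concat_eq_append] at hc hpw hbnd ⊢
      have hlast := hc last (by simp)
      have hlast2 := hbnd last (by simp)
      simp only [List.getLast?_concat, List.dropLast_concat]
      have hpf : front.Pairwise (fun p q => p.2 + 1 < q.1) :=
        (List.pairwise_append.mp hpw).1
      have hcross : ∀ a ∈ front, a.2 + 1 < last.1 :=
        fun a ha => (List.pairwise_append.mp hpw).2.2 a ha last (by simp)
      by_cases hle : max (c - r) 1 ≤ last.2 + 1
      · simp only [if_pos hle]
        by_cases hgt2 : min (c + r) m > last.2
        · simp only [if_pos hgt2]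
          refine ⟨⟨?_, ?_⟩, ?_, fun v => ?_⟩
          · refine List.pairwise_append.mpr ⟨hpf, by simp, ?_⟩
            intro a ha b hb
            simp only [List.mem_singleton] at hb
            subst hb
            exact hcross a ha
          · intro p hp
            rcases List.mem_append.mp hp with hp | hp
            · exact hbnd p (List.mem_append.mpr (Or.inl hp))
            · simp only [List.mem_singleton] at hp
              subst hp
              exact ⟨by omega, by omega, by omega⟩
          · intro p hp
            rcases List.mem_append.mp hp with hp | hp
            · exact hc p (List.mem_append.mpr (Or.inl hp))
            · simp only [List.mem_singleton] at hp
              subst hp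
              exact ⟨hlast.1, le_refl _⟩
          · simp only [pvMemI, List.mem_append, List.mem_singleton]
            constructor
            · rintro ⟨p, (hp | rfl), h1, h2⟩
              · exact Or.inl ⟨p, Or.inl hp, h1, h2⟩
              · by_cases hv : v ≤ last.2
                · exact Or.inl ⟨last, Or.inr rfl, by omega, hv⟩
                · exact Or.inr ⟨by omega, by omega⟩
            · rintro (⟨p, (hp | rfl), h1, h2⟩ | ⟨h1, h2⟩)
              · exact ⟨p, Or.inl hp, h1, h2⟩
              · exact ⟨(p.1, min (c + r) m), Or.inr rfl, h1, by omega⟩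
              · exact ⟨(last.1, min (c + r) m), Or.inr rfl, by omega, h2⟩
        · simp only [if_neg hgt2]
          refine ⟨⟨hpw, hbnd⟩, hc, fun v => ?_⟩
          constructor
          · exact Or.inl
          · rintro (h | ⟨h1, h2⟩)
            · exact h
            · exact ⟨last, by simp, by omega, by omega⟩
      · simp only [if_neg hle]
        refine ⟨⟨?_, ?_⟩, ?_, fun v => ?_⟩
        · refine List.pairwise_append.mpr ⟨hpw, by simp, ?_⟩
          intro a ha b hb
          simp only [List.mem_singleton] at hb
          subst hb
          rcases List.mem_append.mp ha with ha | ha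
          · have := hcross a ha
            simp only []
            omega
          · simp only [List.mem_singleton] at ha
            subst ha
            simp only []
            omega
        · intro p hp
          rcases List.mem_append.mp hp with hp | hp
          · exact hbnd p hp
          · simp only [List.mem_singleton] at hp
            subst hp
            exact ⟨by omega, by omega, by omega⟩
        · intro p hp
          rcases List.mem_append.mp hp with hp | hp
          · exact hc p hp
          · simp only [List.mem_singleton] at hp
            subst hp
            exact ⟨le_refl _, le_refl _⟩
        · simp only [pvMemI, List.mem_append, List.mem_singleton]
          constructor
          · rintro ⟨p, (hp | rfl), h1, h2⟩
            · exact Or.inl ⟨p, hp, h1, h2⟩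
            · exact Or.inr ⟨h1, h2⟩
          · rintro (⟨p, hp, h1, h2⟩ | ⟨h1, h2⟩)
            · exact ⟨p, Or.inl hp, h1, h2⟩
            · exact ⟨(max (c - r) 1, min (c + r) m), Or.inr rfl, h1, h2⟩

lemma pvFoldB (m r : Int) (cs : List Int) (acc : List (Int × Int))
    (hs : cs.Pairwise (· ≤ ·))
    (hinv : pvInv m acc)
    (hc : ∀ p ∈ acc, ∀ x ∈ cs, p.1 ≤ pvLo r x ∧ p.2 ≤ pvHi m r x) :
    pvInv m (cs.foldl (pvStepB m r) acc)
    ∧ ∀ v, (pvMemI (cs.foldl (pvStepB m r) acc) v ↔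
        pvMemI acc v ∨ ∃ c ∈ cs, pvLo r c ≤ v ∧ v ≤ pvHi m r c) := by
  induction cs generalizing acc with
  | nil => exact ⟨hinv, fun v => by simp⟩
  | cons c t ih =>
    obtain ⟨hs1, hs2⟩ := List.pairwise_cons.mp hs
    obtain ⟨hinv', hcompat', hmem'⟩ :=
      pvStepB_spec m r c acc hinv (fun p hp => hc p hp c (List.mem_cons_self ..))
    have hc' : ∀ p ∈ pvStepB m r acc c, ∀ x ∈ t, p.1 ≤ pvLo r x ∧ p.2 ≤ pvHi m r x := by
      intro p hp x hx
      obtain ⟨h1, h2⟩ := hcompat' p hp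
      exact ⟨le_trans h1 (pvLo_mono r c x (hs1 x hx)), le_trans h2 (pvHi_mono m r c x (hs1 x hx))⟩
    obtain ⟨hi1, hi2⟩ := ih (pvStepB m r acc c) hs2 hinv' hc'
    simp only [List.foldl_cons]
    refine ⟨hi1, fun v => ?_⟩
    rw [hi2 v, hmem' v]
    simp only [List.mem_cons]
    constructor
    · rintro ((h | h) | ⟨x, hx, h⟩)
      · exact Or.inl h
      · exact Or.inr ⟨c, Or.inl rfl, h⟩
      · exact Or.inr ⟨x, Or.inr hx, h⟩
    · rintro (h | ⟨x, (rfl | hx), h⟩)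
      · exact Or.inl (Or.inl h)
      · exact Or.inl (Or.inr h)
      · exact Or.inr ⟨x, hx, h⟩

lemma pvFlatten_spec (m : Int) (I : List (Int × Int)) (h : pvInv m I) :
    (I.foldl (fun result p => result ++ PySem.List.pyRange p.1 (p.2 + 1)) []).Pairwise (· < ·)
    ∧ ∀ v, (v ∈ I.foldl (fun result p => result ++ PySem.List.pyRange p.1 (p.2 + 1)) [] ↔ pvMemI I v) := by
  have he : I.foldl (fun result p => result ++ PySem.List.pyRange p.1 (p.2 + 1)) [] =
      ((I.map (fun p : Int × Int => PySem.List.pyRange p.1 (p.2 + 1))).flatten) := by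
    rw [PySem.List.foldl_append_eq_flatMap]
    simp [List.flatMap_def]
  rw [he]
  constructor
  · rw [List.pairwise_flatten]
    constructor
    · intro l hl
      obtain ⟨p, hp, rfl⟩ := List.mem_map.mp hl
      exact PySem.List.pairwise_lt_pyRange_one _ _
    · rw [List.pairwise_map]
      refine h.1.imp ?_
      intro p q hpq x hx y hy
      rw [PySem.List.mem_pyRange_one] at hx hy
      omega
  · intro v
    simp only [List.mem_flatten, List.mem_map, pvMemI]
    constructor
    · rintro ⟨l, ⟨p, hp, rfl⟩, hv⟩
      rw [PySem.List.mem_pyRange_one] at hv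
      exact ⟨p, hp, by omega⟩
    · rintro ⟨p, hp, h1, h2⟩
      exact ⟨_, ⟨p, hp, rfl⟩, by rw [PySem.List.mem_pyRange_one]; omega⟩

lemma B_props (cases : List Int) (m r : Int) :
    (expand_cases_alt cases m r).Pairwise (· < ·)
    ∧ ∀ v, (v ∈ expand_cases_alt cases m r ↔
        0 < v ∧ v ≤ m ∧ ∃ c ∈ cases, c - r ≤ v ∧ v ≤ c + r) := by
  have hs : (PySem.List.sorted cases (fun x => x)).Pairwise (· ≤ ·) :=
    PySem.List.sorted_pairwise cases (fun x => x)
  obtain ⟨hinv, hmem⟩ := pvFoldB m r (PySem.List.sorted cases (fun x => x)) []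
    hs ⟨List.Pairwise.nil, by simp⟩ (by simp)
  obtain ⟨hpw, hfm⟩ := pvFlatten_spec m _ hinv
  have heq : expand_cases_alt cases m r =
      ((PySem.List.sorted cases (fun x => x)).foldl (pvStepB m r) []).foldl
        (fun result p => result ++ PySem.List.pyRange p.1 (p.2 + 1)) [] := rfl
  rw [heq]
  refine ⟨hpw, fun v => ?_⟩
  rw [hfm v, hmem v]
  simp only [pvMemI, List.not_mem_nil, false_and, exists_false, false_or,
    PySem.List.mem_sorted]
  constructor
  · rintro ⟨c, hc, h1, h2⟩
    simp only [pvLo, pvHi] at h1 h2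
    exact ⟨by omega, by omega, c, hc, by omega, by omega⟩
  · rintro ⟨h1, h2, c, hc, h3, h4⟩
    refine ⟨c, hc, ?_, ?_⟩ <;> simp only [pvLo, pvHi] <;> omega

lemma pvNodup_add {s : PySem.Set Int} {x : Int} (h : s.Nodup) : (s.add x).Nodup := by
  unfold PySem.Set.add
  split
  · exact h
  · next hc =>
    have hx : x ∉ s := by
      intro hm
      exact hc (by simpa [PySem.Set.contains] using hm)
    simp only [List.nodup_append, List.nodup_singleton, true_and, h, List.mem_singleton]
    rintro a ha b rfl h
    subst h
    exact hx ha

lemma A_inner_mem (m case : Int) (rng : List Int) (s : PySem.Set Int) (v : Int) :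
    (v ∈ rng.foldl (fun s i =>
        let expanded_value := case + i
        if 0 < expanded_value ∧ expanded_value ≤ m then s.add expanded_value else s) s) ↔
      v ∈ s ∨ ∃ i ∈ rng, v = case + i ∧ 0 < v ∧ v ≤ m := by
  induction rng generalizing s with
  | nil => simp
  | cons i t ih =>
    simp only [List.foldl_cons]
    rw [ih]
    by_cases h : 0 < case + i ∧ case + i ≤ m
    · simp only [if_pos h, PySem.Set.mem_add, List.mem_cons]
      constructor
      · rintro ((hs | rfl) | ⟨j, hj, rfl, h1, h2⟩)
        · exact Or.inl hs
        · exact Or.inr ⟨i, Or.inl rfl, rfl, h.1, h.2⟩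
        · exact Or.inr ⟨j, Or.inr hj, rfl, h1, h2⟩
      · rintro (hs | ⟨j, (rfl | hj), rfl, h1, h2⟩)
        · exact Or.inl (Or.inl hs)
        · exact Or.inl (Or.inr rfl)
        · exact Or.inr ⟨j, hj, rfl, h1, h2⟩
    · simp only [if_neg h, List.mem_cons]
      constructor
      · rintro (hs | ⟨j, hj, rfl, h1, h2⟩)
        · exact Or.inl hs
        · exact Or.inr ⟨j, Or.inr hj, rfl, h1, h2⟩
      · rintro (hs | ⟨j, (rfl | hj), rfl, h1, h2⟩)
        · exact Or.inl hs
        · exact absurd ⟨h1, h2⟩ h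
        · exact Or.inr ⟨j, hj, rfl, h1, h2⟩

lemma A_inner_nodup (m case : Int) (rng : List Int) (s : PySem.Set Int) (h : s.Nodup) :
    (rng.foldl (fun s i =>
        let expanded_value := case + i
        if 0 < expanded_value ∧ expanded_value ≤ m then s.add expanded_value else s) s).Nodup := by
  induction rng generalizing s with
  | nil => exact h
  | cons i t ih =>
    simp only [List.foldl_cons]
    apply ih
    split
    · exact pvNodup_add h
    · exact h

lemma A_outer_mem (m r : Int) (cs : List Int) (s : PySem.Set Int) (v : Int) :
    (v ∈ cs.foldl (fun s case =>
        (PySem.List.pyRange (-r) (r + 1)).foldl (fun s i =>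
          let expanded_value := case + i
          if 0 < expanded_value ∧ expanded_value ≤ m then s.add expanded_value else s) s) s) ↔
      v ∈ s ∨ (0 < v ∧ v ≤ m ∧ ∃ c ∈ cs, c - r ≤ v ∧ v ≤ c + r) := by
  induction cs generalizing s with
  | nil => simp
  | cons c t ih =>
    simp only [List.foldl_cons]
    rw [ih, A_inner_mem]
    constructor
    · rintro ((hs | ⟨i, hi, rfl, h1, h2⟩) | ⟨h1, h2, x, hx, hw1, hw2⟩)
      · exact Or.inl hs
      · rw [PySem.List.mem_pyRange_one] at hi
        exact Or.inr ⟨h1, h2, c, List.mem_cons_self .., by omega, by omega⟩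
      · exact Or.inr ⟨h1, h2, x, List.mem_cons_of_mem _ hx, hw1, hw2⟩
    · rintro (hs | ⟨h1, h2, x, hx, hw1, hw2⟩)
      · exact Or.inl (Or.inl hs)
      · rcases List.mem_cons.mp hx with rfl | hx
        · refine Or.inl (Or.inr ⟨v - x, ?_, by ring, h1, h2⟩)
          rw [PySem.List.mem_pyRange_one]; omega
        · exact Or.inr ⟨h1, h2, x, hx, hw1, hw2⟩

lemma A_outer_nodup (m r : Int) (cs : List Int) (s : PySem.Set Int) (h : s.Nodup) :
    (cs.foldl (fun s case =>
        (PySem.List.pyRange (-r) (r + 1)).foldl (fun s i =>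
          let expanded_value := case + i
          if 0 < expanded_value ∧ expanded_value ≤ m then s.add expanded_value else s) s) s).Nodup := by
  induction cs generalizing s with
  | nil => exact h
  | cons c t ih =>
    simp only [List.foldl_cons]
    exact ih _ (A_inner_nodup m c _ s h)

lemma A_props (cases : List Int) (m r : Int) :
    (expand_cases cases m r).Pairwise (· < ·)
    ∧ ∀ v, (v ∈ expand_cases cases m r ↔
        0 < v ∧ v ≤ m ∧ ∃ c ∈ cases, c - r ≤ v ∧ v ≤ c + r) := by
  have hnd : (cases.foldl (fun (s : PySem.Set Int) (case : Int) =>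
      (PySem.List.pyRange (-r) (r + 1)).foldl (fun (s : PySem.Set Int) (i : Int) =>
        let expanded_value := case + i
        if 0 < expanded_value ∧ expanded_value ≤ m then s.add expanded_value else s) s)
      PySem.Set.empty).Nodup := A_outer_nodup m r cases PySem.Set.empty (by simp [PySem.Set.empty])
  constructor
  · have hle := PySem.List.sorted_pairwise (cases.foldl (fun (s : PySem.Set Int) (case : Int) =>
      (PySem.List.pyRange (-r) (r + 1)).foldl (fun (s : PySem.Set Int) (i : Int) =>
        let expanded_value := case + i
        if 0 < expanded_value ∧ expanded_value ≤ m then s.add expanded_value else s) s)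
      PySem.Set.empty) (fun x => x)
    have hnd2 : (expand_cases cases m r).Nodup :=
      ((PySem.List.sorted_perm _ _ _).nodup_iff).mpr hnd
    exact (hle.and hnd2).imp (fun h => lt_of_le_of_ne h.1 h.2)
  · intro v
    unfold expand_cases
    rw [PySem.List.mem_sorted, A_outer_mem]
    simp [PySem.Set.empty]

-- ===== VERDICT (by name: the statement is the Claim_ definition above) =====
theorem expand_cases_spec : Claim_equal_expand_cases := by
  intro cases m r _
  show expand_cases cases m r = expand_cases_alt cases m r
  obtain ⟨hA, hAm⟩ := A_props cases m r
  obtain ⟨hB, hBm⟩ := B_props cases m r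
  have hAn : (expand_cases cases m r).Nodup := hA.imp (fun h => ne_of_lt h)
  have hBn : (expand_cases_alt cases m r).Nodup := hB.imp (fun h => ne_of_lt h)
  have hperm : (expand_cases cases m r).Perm (expand_cases_alt cases m r) :=
    (List.perm_ext_iff_of_nodup hAn hBn).mpr (fun a => by rw [hAm, hBm])
  exact List.eq_of_perm_of_sorted (fun a b _ _ h1 h2 => absurd h2 (lt_asymm h1)) hA hB hperm
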